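-- pv_equiv track=rewrite | github.com/qeedquan/challenges | codegolf/pair-and-sort-from-two-integer-lists.py | find_nearest_pairs_to_100
-- ===== SOURCE A (Python) =====
-- def find_nearest_pairs_to_100(l, m):
--     pair_list = sorted([((i, j), abs(100 - i - j)) for i in l for j in m], key=lambda x: x[1])
--     chosen_pairs = []
--     while pair_list:
--         best_pair = pair_list[0][0]
--         chosen_pairs.append(best_pair)
--         pair_list = [(p, s) for (p, s) in pair_list if p[0] != best_pair[0] and p[1] != best_pair[1]]
--     return chosen_pairs
-- ===== SOURCE B (Python) =====
-- def find_nearest_pairs_to_100(l, m):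
--     pairs = sorted(((i, j) for i in l for j in m), key=lambda p: abs(100 - p[0] - p[1]))
--     used_i = set()
--     used_j = set()
--     chosen = []
--     for i, j in pairs:
--         if i not in used_i and j not in used_j:
--             chosen.append((i, j))
--             used_i.add(i)
--             used_j.add(j)
--     return chosen
-- ===== Notes on version B (the rewrite author's own statement) =====
-- stated objective: faster
-- what changed: Replaces the repeated rebuild-and-filter of the whole candidate list after each pick with a single pass over the sorted candidates using two used-value sets, removing the quadratic refiltering.
import Mathlib
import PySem

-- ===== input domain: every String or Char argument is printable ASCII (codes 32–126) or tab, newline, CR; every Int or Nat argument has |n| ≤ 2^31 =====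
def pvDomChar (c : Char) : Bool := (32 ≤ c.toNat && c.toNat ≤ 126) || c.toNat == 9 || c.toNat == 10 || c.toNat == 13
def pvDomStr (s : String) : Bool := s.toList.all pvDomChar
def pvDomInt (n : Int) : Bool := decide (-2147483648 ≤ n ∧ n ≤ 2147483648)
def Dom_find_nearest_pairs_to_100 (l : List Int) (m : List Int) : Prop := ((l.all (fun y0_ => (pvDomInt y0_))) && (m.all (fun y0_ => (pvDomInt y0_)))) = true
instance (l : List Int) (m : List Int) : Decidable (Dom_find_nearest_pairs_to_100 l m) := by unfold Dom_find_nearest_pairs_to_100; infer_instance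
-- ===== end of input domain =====

-- B replaces A's repeated refiltering of the whole sorted candidate list with one pass
-- over it keeping two used-value sets (objective: faster; same return value).


-- ===== PORT A =====
-- A's while loop: take the head pair, then rebuild pair_list keeping only entries
-- differing from it in both components (the head itself fails the filter).
def pvALoop : List ((Int × Int) × Int) → List (Int × Int)
  | [] => []
  | (bp, s) :: rest =>
    bp :: pvALoop (((bp, s) :: rest).filter (fun q => q.1.1 != bp.1 && q.1.2 != bp.2))
termination_by ps => ps.length
decreasing_by
  simp only [List.filter_cons, bne_self_eq_false, Bool.false_and, List.length_cons]
  exact Nat.lt_succ_of_le (List.length_filter_le _ _)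

def find_nearest_pairs_to_100 (l : List Int) (m : List Int) : List (Int × Int) :=
  pvALoop (PySem.List.sorted
    (l.flatMap (fun i => m.map (fun j => ((i, j), |100 - i - j|))))
    (fun x => x.2))

-- ===== PORT B =====
-- B's single pass with used-value sets.
def pvBLoop : List (Int × Int) → PySem.Set Int → PySem.Set Int → List (Int × Int)
  | [], _, _ => []
  | (i, j) :: rest, ui, uj =>
    if !(PySem.Set.contains ui i) && !(PySem.Set.contains uj j) then
      (i, j) :: pvBLoop rest (PySem.Set.add ui i) (PySem.Set.add uj j)
    else
      pvBLoop rest ui uj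

def find_nearest_pairs_to_100_alt (l : List Int) (m : List Int) : List (Int × Int) :=
  pvBLoop (PySem.List.sorted
      (l.flatMap (fun i => m.map (fun j => (i, j))))
      (fun p => |100 - p.1 - p.2|))
    PySem.Set.empty PySem.Set.empty

-- ===== PRECONDITION & SPEC =====
def Spec_find_nearest_pairs_to_100 (l : List Int) (m : List Int) (out : List (Int × Int)) : Prop := out = find_nearest_pairs_to_100_alt l m
instance (l : List Int) (m : List Int) (out : List (Int × Int)) : Decidable (Spec_find_nearest_pairs_to_100 l m out) := by unfold Spec_find_nearest_pairs_to_100; infer_instance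

-- ===== CLAIM (what is proved, stated in full; the proofs are below) =====
def Claim_equal_find_nearest_pairs_to_100 : Prop := ∀ (l : List Int) (m : List Int), Dom_find_nearest_pairs_to_100 l m → Spec_find_nearest_pairs_to_100 l m (find_nearest_pairs_to_100 l m)

-- ===== LEMMAS AND PROOFS =====

-- Tagging each pair with its score commutes with a stable insertion.
theorem insertBy_map_score (k : Int × Int → Int) (p : Int × Int) (ys : List (Int × Int)) :
    PySem.List.insertBy (fun a b => decide (a.2 < b.2)) (p, k p)
        (ys.map (fun q => (q, k q)))
      = (PySem.List.insertBy (fun a b => decide (k a < k b)) p ys).map (fun q => (q, k q)) := by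
  induction ys with
  | nil => rfl
  | cons y ys ih =>
    simp only [List.map_cons, PySem.List.insertBy]
    by_cases h : k p < k y
    · simp [h]
    · simp [h, ih]

-- Tagging each pair with its score commutes with Python's stable sort on that score.
theorem sorted_map_score (k : Int × Int → Int) (xs : List (Int × Int)) :
    PySem.List.sorted (xs.map (fun q => (q, k q))) (fun x => x.2)
      = (PySem.List.sorted xs k).map (fun q => (q, k q)) := by
  rw [PySem.List.sorted_eq_foldl_insertBy, PySem.List.sorted_eq_foldl_insertBy]
  suffices h : ∀ acc : List (Int × Int),
      List.foldl (fun acc x => PySem.List.insertBy (fun a b => decide (a.2 < b.2)) x acc)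
        (acc.map (fun q => (q, k q))) (xs.map (fun q => (q, k q)))
      = (List.foldl (fun acc x => PySem.List.insertBy (fun a b => decide (k a < k b)) x acc)
          acc xs).map (fun q => (q, k q)) by
    simpa using h []
  induction xs with
  | nil => intro acc; rfl
  | cons x xs ih =>
    intro acc
    simp only [List.map_cons, List.foldl_cons]
    rw [insertBy_map_score, ih]

-- Core invariant: B's scan with used sets equals A's loop on the score-tagged list
-- restricted to the pairs both of whose components are still unused.
theorem pvBLoop_eq_pvALoop (k : Int × Int → Int) (qs : List (Int × Int)) :
    ∀ ui uj : PySem.Set Int,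
    pvBLoop qs ui uj
      = pvALoop ((qs.filter
          (fun p => !(PySem.Set.contains ui p.1) && !(PySem.Set.contains uj p.2))).map
            (fun q => (q, k q))) := by
  induction qs with
  | nil => intro ui uj; simp [pvBLoop, pvALoop]
  | cons q qs ih =>
    intro ui uj
    obtain ⟨i, j⟩ := q
    by_cases h : (!(PySem.Set.contains ui i) && !(PySem.Set.contains uj j)) = true
    · have hi : i ∉ ui := by simp_all [PySem.Set.contains, List.contains_eq_mem]
      have hj : j ∉ uj := by simp_all [PySem.Set.contains, List.contains_eq_mem]
      rw [show List.filter
            (fun p => !(PySem.Set.contains ui p.1) && !(PySem.Set.contains uj p.2))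
            ((i, j) :: qs)
          = (i, j) :: List.filter
            (fun p => !(PySem.Set.contains ui p.1) && !(PySem.Set.contains uj p.2)) qs
          from by simp [PySem.Set.contains, List.contains_eq_mem, hi, hj]]
      simp only [List.map_cons, pvBLoop, pvALoop, h, if_true, List.filter_cons,
        bne_self_eq_false, Bool.false_and]
      congr 1
      rw [List.filter_map]
      simp only [Function.comp_def, List.filter_filter]
      rw [ih (PySem.Set.add ui i) (PySem.Set.add uj j)]
      congr 1
      congr 1
      apply List.filter_congr
      intro p _
      by_cases hui : p.1 ∈ ui <;> by_cases hpi : p.1 = i <;>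
        by_cases huj : p.2 ∈ uj <;> by_cases hpj : p.2 = j <;>
        simp_all [PySem.Set.add, PySem.Set.contains,
          List.contains_eq_mem, bne]
    · rw [show List.filter
            (fun p => !(PySem.Set.contains ui p.1) && !(PySem.Set.contains uj p.2))
            ((i, j) :: qs)
          = List.filter
            (fun p => !(PySem.Set.contains ui p.1) && !(PySem.Set.contains uj p.2)) qs
          from by simp only [List.filter_cons]; simpa using h]
      simp only [pvBLoop, if_neg h]
      exact ih ui uj

-- On empty used sets the filter keeps everything.
theorem filter_empty_sets (qs : List (Int × Int)) :
    qs.filter (fun p => !(PySem.Set.contains PySem.Set.empty p.1)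
        && !(PySem.Set.contains PySem.Set.empty p.2)) = qs := by
  simp [PySem.Set.contains, PySem.Set.empty]

-- The two candidate-list builders produce the same pairs, B's untagged.
theorem build_eq (l m : List Int) :
    l.flatMap (fun i => m.map (fun j => ((i, j), |100 - i - j|)))
      = (l.flatMap (fun i => m.map (fun j => (i, j)))).map
          (fun q => (q, |100 - q.1 - q.2|)) := by
  simp [List.map_flatMap, Function.comp_def, List.map_map]

-- ===== VERDICT (by name: the statement is the Claim_ definition above) =====
theorem find_nearest_pairs_to_100_spec : Claim_equal_find_nearest_pairs_to_100 := by
  intro l m _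
  unfold Spec_find_nearest_pairs_to_100 find_nearest_pairs_to_100 find_nearest_pairs_to_100_alt
  rw [pvBLoop_eq_pvALoop (fun q => |100 - q.1 - q.2|), filter_empty_sets,
    build_eq, sorted_map_score]
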